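-- pv_equiv track=rewrite | github.com/mitchellnel/technical-interview-prep | algoexpert/hard/sameBSTs.py | sameBSTs_n2
-- ===== SOURCE A (Python) =====
-- def sameBSTs_n2(arrayOne, arrayTwo):
--     if len(arrayOne) != len(arrayTwo):
--         return False
--     elif not arrayOne and not arrayTwo:
--         return True
--     elif arrayOne[0] != arrayTwo[0]:
--         return False
--
--     root_one = arrayOne[0]
--     root_two = arrayTwo[0]
--
--     left_sub_one = []
--     left_sub_two = []
--     right_sub_one = []
--     right_sub_two = []
--     for i in range(1, len(arrayOne)):
--         if arrayOne[i] < root_one: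
--             left_sub_one.append(arrayOne[i])
--         else:
--             right_sub_one.append(arrayOne[i])
--
--         if arrayTwo[i] < root_two:
--             left_sub_two.append(arrayTwo[i])
--         else:
--             right_sub_two.append(arrayTwo[i])
--
--     return sameBSTs_n2(left_sub_one, left_sub_two) and sameBSTs_n2(
--         right_sub_one, right_sub_two
--     )
-- ===== SOURCE B (Python) =====
-- def sameBSTs_n2(arrayOne, arrayTwo):
--     # Build the BST each array describes (node = [value, left, right]; duplicates go
--     # right) by descending from the root for each element, then compare the two trees.
--     def build(arr):
--         root = None
--         for x in arr:
--             if root is None: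
--                 root = [x, None, None]
--                 continue
--             cur = root
--             while True:
--                 i = 1 if x < cur[0] else 2
--                 if cur[i] is None:
--                     cur[i] = [x, None, None]
--                     break
--                 cur = cur[i]
--         return root
--
--     return build(arrayOne) == build(arrayTwo)
-- ===== Notes on version B (the rewrite author's own statement) =====
-- stated objective: simpler
-- what changed: Instead of A's recursive quadruple-partition-and-compare recursion, B explicitly builds the BST each array describes (descend from the root per element; < goes left, >= goes right) and compares the two trees for structural equality.
import Mathlib
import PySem

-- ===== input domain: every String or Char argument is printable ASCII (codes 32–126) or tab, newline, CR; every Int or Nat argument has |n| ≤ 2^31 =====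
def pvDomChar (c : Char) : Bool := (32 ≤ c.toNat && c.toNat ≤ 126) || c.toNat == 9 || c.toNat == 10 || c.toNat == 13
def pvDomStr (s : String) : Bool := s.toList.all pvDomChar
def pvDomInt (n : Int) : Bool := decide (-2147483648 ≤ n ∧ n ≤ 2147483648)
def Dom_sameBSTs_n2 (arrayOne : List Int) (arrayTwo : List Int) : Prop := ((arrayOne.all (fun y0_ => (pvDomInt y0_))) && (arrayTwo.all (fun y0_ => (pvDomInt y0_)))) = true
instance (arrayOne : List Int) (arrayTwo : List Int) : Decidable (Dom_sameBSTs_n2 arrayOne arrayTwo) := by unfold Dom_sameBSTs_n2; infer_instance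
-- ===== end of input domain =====

-- B builds the two BSTs explicitly and compares them; the return value is proved equal to A's everywhere.

-- ===== PORT A =====
-- the four-list partition loop of A: for i in range(1, len(arrayOne)): append to left/right sublists
def pvStep (r1 r2 : Int) (st : List Int × List Int × List Int × List Int) (x y : Int) :
    List Int × List Int × List Int × List Int :=
  let st1 := if x < r1 then (st.1 ++ [x], st.2.1, st.2.2.1, st.2.2.2)
             else (st.1, st.2.1, st.2.2.1 ++ [x], st.2.2.2)
  if y < r2 then (st1.1, st1.2.1 ++ [y], st1.2.2.1, st1.2.2.2)
  else (st1.1, st1.2.1, st1.2.2.1, st1.2.2.2 ++ [y])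

def pvLoop (a b : List Int) (r1 r2 : Int) : List Int × List Int × List Int × List Int :=
  (PySem.List.pyRange 1 (a.length : Int) 1).foldl
    (fun st i => pvStep r1 r2 st (PySem.List.pyGetD a i 0) (PySem.List.pyGetD b i 0)) ([], [], [], [])

-- characterisation of the loop, needed (by name) for A's termination
theorem pvLoop_go (r1 r2 : Int) (a b : List Int) (hb : b.length = a.length) :
  ∀ (m k : Nat) (init : List Int × List Int × List Int × List Int), a.length - k = m → k ≤ a.length →
    (PySem.List.pyRange (k : Int) (a.length : Int) 1).foldl
      (fun st i => pvStep r1 r2 st (PySem.List.pyGetD a i 0) (PySem.List.pyGetD b i 0)) init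
    = (init.1 ++ (a.drop k).filter (fun x => decide (x < r1)),
       init.2.1 ++ (b.drop k).filter (fun x => decide (x < r2)),
       init.2.2.1 ++ (a.drop k).filter (fun x => !decide (x < r1)),
       init.2.2.2 ++ (b.drop k).filter (fun x => !decide (x < r2))) := by
  intro m
  induction m with
  | zero =>
    intro k init hm hk
    have hk' : k = a.length := by omega
    subst hk'
    rw [PySem.List.pyRange_one_eq_nil (by omega)]
    simp [List.drop_eq_nil_of_le, hb]
  | succ m ih =>
    intro k init hm hk
    have hklt : k < a.length := by omega
    have hkb : k < b.length := by omega
    rw [PySem.List.pyRange_one_cons (by exact_mod_cast hklt)]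
    simp only [List.foldl_cons]
    have hga : PySem.List.pyGetD a (k : Int) 0 = a[k] := by
      simp [PySem.List.pyGetD_natCast, List.getD_eq_getElem?_getD, List.getElem?_eq_getElem hklt]
    have hgb : PySem.List.pyGetD b (k : Int) 0 = b[k] := by
      simp [PySem.List.pyGetD_natCast, List.getD_eq_getElem?_getD, List.getElem?_eq_getElem hkb]
    have hda : a.drop k = a[k] :: a.drop (k+1) := List.drop_eq_getElem_cons hklt
    have hdb : b.drop k = b[k] :: b.drop (k+1) := List.drop_eq_getElem_cons hkb
    have hcast : ((k : Int) + 1) = ((k+1 : Nat) : Int) := by push_cast; ring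
    rw [hga, hgb, hcast, ih (k+1) _ (by omega) (by omega), hda, hdb]
    simp only [pvStep, List.filter_cons]
    by_cases h1 : a[k] < r1 <;> by_cases h2 : b[k] < r2 <;>
      simp [h1, h2, List.append_assoc]

def sameBSTs_n2 (arrayOne : List Int) (arrayTwo : List Int) : Bool :=
  if h1 : arrayOne.length ≠ arrayTwo.length then false
  else if h2 : arrayOne = [] ∧ arrayTwo = [] then true
  else if PySem.List.pyGetD arrayOne 0 0 ≠ PySem.List.pyGetD arrayTwo 0 0 then false
  else
    let r1 := PySem.List.pyGetD arrayOne 0 0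
    let r2 := PySem.List.pyGetD arrayTwo 0 0
    let p := pvLoop arrayOne arrayTwo r1 r2
    sameBSTs_n2 p.1 p.2.1 && sameBSTs_n2 p.2.2.1 p.2.2.2
termination_by arrayOne.length
decreasing_by
  all_goals {
    have hlen : arrayTwo.length = arrayOne.length := by omega
    have hne : arrayOne ≠ [] := by
      intro h
      apply h2
      constructor
      · exact h
      · have : arrayTwo.length = 0 := by simp [hlen, h]
        exact List.eq_nil_of_length_eq_zero this
    have hpos : 1 ≤ arrayOne.length := by
      cases arrayOne with
      | nil => exact absurd rfl hne
      | cons x t => simp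
    have := pvLoop_go r1 r2 arrayOne arrayTwo hlen (arrayOne.length - 1) 1 ([], [], [], []) rfl hpos
    simp only [pvLoop, Nat.cast_one] at *
    rw [this]
    simp only [List.nil_append]
    calc _ ≤ (arrayOne.drop 1).length := List.length_filter_le _ _
      _ < arrayOne.length := by simp [List.length_drop]; omega
  }

-- ===== PORT B =====
inductive PVTree where
  | leaf : PVTree
  | node : Int → PVTree → PVTree → PVTree
deriving DecidableEq, Repr

def pvInsert : PVTree → Int → PVTree
  | .leaf, x => .node x .leaf .leaf
  | .node v l r, x => if x < v then .node v (pvInsert l x) r else .node v l (pvInsert r x)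

def pvBuild (xs : List Int) : PVTree := xs.foldl pvInsert .leaf

def sameBSTs_n2_alt (arrayOne : List Int) (arrayTwo : List Int) : Bool :=
  pvBuild arrayOne == pvBuild arrayTwo

-- ===== PRECONDITION & SPEC =====
def Spec_sameBSTs_n2 (arrayOne : List Int) (arrayTwo : List Int) (out : Bool) : Prop := out = sameBSTs_n2_alt arrayOne arrayTwo
instance (arrayOne : List Int) (arrayTwo : List Int) (out : Bool) : Decidable (Spec_sameBSTs_n2 arrayOne arrayTwo out) := by unfold Spec_sameBSTs_n2; infer_instance

-- ===== CLAIM (what is proved, stated in full; the proofs are below) =====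
def Claim_equal_sameBSTs_n2 : Prop := ∀ (arrayOne : List Int) (arrayTwo : List Int), Dom_sameBSTs_n2 arrayOne arrayTwo → Spec_sameBSTs_n2 arrayOne arrayTwo (sameBSTs_n2 arrayOne arrayTwo)

-- ===== LEMMAS AND PROOFS =====
def pvSize : PVTree → Nat
  | .leaf => 0
  | .node _ l r => pvSize l + pvSize r + 1

theorem pvSize_insert (t : PVTree) (x : Int) : pvSize (pvInsert t x) = pvSize t + 1 := by
  induction t with
  | leaf => simp [pvInsert, pvSize]
  | node v l r ihl ihr =>
    simp only [pvInsert]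
    by_cases h : x < v <;> simp [h, pvSize, ihl, ihr] <;> omega

theorem pvSize_foldl (xs : List Int) : ∀ t : PVTree, pvSize (xs.foldl pvInsert t) = pvSize t + xs.length := by
  induction xs with
  | nil => simp
  | cons x xs ih => intro t; simp [List.foldl_cons, ih, pvSize_insert]; omega

theorem pvSize_build (xs : List Int) : pvSize (pvBuild xs) = xs.length := by
  simp [pvBuild, pvSize_foldl, pvSize]

theorem pvFoldl_node (xs : List Int) : ∀ (v : Int) (l r : PVTree),
    xs.foldl pvInsert (.node v l r)
    = .node v ((xs.filter (fun x => decide (x < v))).foldl pvInsert l)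
              ((xs.filter (fun x => !decide (x < v))).foldl pvInsert r) := by
  induction xs with
  | nil => intro v l r; simp
  | cons x xs ih =>
    intro v l r
    simp only [List.foldl_cons, pvInsert, List.filter_cons]
    by_cases h : x < v <;> simp [h, ih]

theorem pvBuild_cons (x : Int) (xs : List Int) :
    pvBuild (x :: xs)
    = .node x (pvBuild (xs.filter (fun y => decide (y < x))))
              (pvBuild (xs.filter (fun y => !decide (y < x)))) := by
  simp [pvBuild, List.foldl_cons, pvInsert, pvFoldl_node]

theorem pvMain (n : Nat) : ∀ (a b : List Int), a.length ≤ n →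
    sameBSTs_n2 a b = (pvBuild a == pvBuild b) := by
  induction n with
  | zero =>
    intro a b ha
    have ha' : a = [] := List.eq_nil_of_length_eq_zero (by omega)
    subst ha'
    rw [sameBSTs_n2]
    cases b with
    | nil => simp
    | cons y u =>
      have hsz : pvBuild [] ≠ pvBuild (y :: u) := by
        intro h
        have := congrArg pvSize h
        simp [pvSize_build] at this
      rw [dif_pos (by simp)]
      exact (beq_eq_false_iff_ne.mpr hsz).symm
  | succ n ih =>
    intro a b ha
    rw [sameBSTs_n2]
    by_cases hlen : a.length ≠ b.length
    · have hsz : pvBuild a ≠ pvBuild b := by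
        intro h
        have := congrArg pvSize h
        simp [pvSize_build] at this
        exact hlen this
      rw [dif_pos hlen]
      exact (beq_eq_false_iff_ne.mpr hsz).symm
    · rw [dif_neg hlen]
      push_neg at hlen
      by_cases hemp : a = [] ∧ b = []
      · rw [dif_pos hemp]
        simp [hemp.1, hemp.2, pvBuild]
      · rw [dif_neg hemp]
        cases a with
        | nil =>
          exact absurd ⟨rfl, List.eq_nil_of_length_eq_zero (by simp at hlen; omega)⟩ hemp
        | cons x t =>
          cases b with
          | nil => simp at hlen
          | cons y u =>
            simp only [PySem.List.pyGetD_zero_cons]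
            by_cases hxy : x ≠ y
            · rw [if_pos hxy]
              have hne : pvBuild (x :: t) ≠ pvBuild (y :: u) := by
                rw [pvBuild_cons, pvBuild_cons]
                intro h
                exact hxy (PVTree.node.injEq _ _ _ _ _ _ ▸ h).1
              exact (beq_eq_false_iff_ne.mpr hne).symm
            · push_neg at hxy
              subst hxy
              rw [if_neg (by simp)]
              have hlent : u.length = t.length := by simpa using hlen.symm
              have hb' : (x :: u).length = (x :: t).length := by simp [hlent]
              have hloop := pvLoop_go x x (x :: t) (x :: u) hb' t.length 1 ([], [], [], [])
                (by simp) (by simp)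
              simp only [pvLoop]
              simp only [List.length_cons, Nat.cast_one] at hloop ⊢
              rw [hloop]
              simp only [List.drop_one, List.tail_cons, List.nil_append]
              have hat : t.length ≤ n := by simpa using ha
              rw [ih _ _ (le_trans (List.length_filter_le _ _) hat),
                  ih _ _ (le_trans (List.length_filter_le _ _) hat)]
              rw [pvBuild_cons, pvBuild_cons]
              rw [Bool.eq_iff_iff]
              simp [Bool.and_eq_true, beq_iff_eq, PVTree.node.injEq]

-- ===== VERDICT (by name: the statement is the Claim_ definition above) =====
theorem sameBSTs_n2_spec : Claim_equal_sameBSTs_n2 := by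
  intro a b _
  unfold Spec_sameBSTs_n2 sameBSTs_n2_alt
  exact pvMain a.length a b le_rfl
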